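-- pv_equiv track=rewrite | github.com/angelfish91/URL-Graph | src/graph.py | calc_path_similarity
-- ===== SOURCE A (Python) =====
-- def calc_path_similarity(bpath, cpath):
--     assert isinstance(bpath, str) and isinstance(cpath, str)
--     if bpath.startswith("/"):
--         bpath = bpath[1:]
--     if cpath.startswith("/"):
--         cpath = cpath[1:]
--     if bpath.endswith("/"):
--         bpath = bpath[:-1]
--     if cpath.endswith("/"):
--         cpath = cpath[:-1]
--     bpath_token = bpath.split('/')
--     cpath_token = cpath.split('/')
--     sim_score = 0
--     sim_path = ""
--     for i in range(min(len(bpath_token), len(cpath_token))):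
--         if bpath_token[i] != cpath_token[i]:
--             break
--         sim_score += 2**(i + 1)
--         sim_path += "/%s" % bpath_token[i]
--     return sim_score, sim_path
-- ===== SOURCE B (Python) =====
-- from itertools import takewhile
--
--
-- def calc_path_similarity(bpath, cpath):
--     assert isinstance(bpath, str) and isinstance(cpath, str)
--     btok = bpath.removeprefix('/').removesuffix('/').split('/')
--     ctok = cpath.removeprefix('/').removesuffix('/').split('/')
--     matched = [b for b, _ in takewhile(lambda p: p[0] == p[1], zip(btok, ctok))]
--     return 2 ** (len(matched) + 1) - 2, ''.join('/' + t for t in matched)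
-- ===== Notes on version B (the rewrite author's own statement) =====
-- stated objective: alternative
-- what changed: The per-index loop that accumulates sim_score += 2**(i+1) and appends to sim_path with break is replaced by a zip/takewhile computation of the matched token prefix, from which the score is the closed form 2**(L+1)-2 and the path a single join.
import Mathlib
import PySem

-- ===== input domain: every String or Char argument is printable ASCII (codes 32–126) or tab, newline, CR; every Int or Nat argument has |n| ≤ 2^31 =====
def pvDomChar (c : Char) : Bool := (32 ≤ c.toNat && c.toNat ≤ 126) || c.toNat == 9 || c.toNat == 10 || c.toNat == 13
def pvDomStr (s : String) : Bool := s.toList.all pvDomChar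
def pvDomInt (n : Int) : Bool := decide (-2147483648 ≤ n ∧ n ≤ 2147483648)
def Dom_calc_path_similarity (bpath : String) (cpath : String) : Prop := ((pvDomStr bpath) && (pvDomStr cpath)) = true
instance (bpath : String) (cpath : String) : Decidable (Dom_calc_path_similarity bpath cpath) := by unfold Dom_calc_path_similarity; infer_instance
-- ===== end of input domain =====

-- B replaces A's indexed accumulate-and-break loop by a zip/takeWhile matched prefix,
-- a closed-form score 2^(L+1)-2 and one join; alternative decomposition, same cost.

-- ===== PORT A =====
-- A's for-loop over range(min(len,len)) with break, accumulating sim_score and sim_path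
def pvALoop (bt ct : List (List Char)) (n i : Nat) (score : Int) (path : List Char) :
    Int × List Char :=
  if _h : i < n then
    if bt.getD i [] ≠ ct.getD i [] then (score, path)
    else pvALoop bt ct n (i + 1) (score + 2 ^ (i + 1)) (path ++ '/' :: bt.getD i [])
  else (score, path)
  termination_by n - i

def calc_path_similarity (bpath : String) (cpath : String) : Int × String :=
  let b0 := bpath.toList
  let c0 := cpath.toList
  let b1 := if PySem.Chars.startswith b0 ['/'] then PySem.Chars.slice b0 (some 1) none else b0
  let c1 := if PySem.Chars.startswith c0 ['/'] then PySem.Chars.slice c0 (some 1) none else c0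
  let b2 := if PySem.Chars.endswith b1 ['/'] then PySem.Chars.slice b1 none (some (-1)) else b1
  let c2 := if PySem.Chars.endswith c1 ['/'] then PySem.Chars.slice c1 none (some (-1)) else c1
  let bt := PySem.Chars.splitOn b2 ['/']
  let ct := PySem.Chars.splitOn c2 ['/']
  let r := pvALoop bt ct (min bt.length ct.length) 0 0 []
  (r.1, String.ofList r.2)

-- ===== PORT B =====
-- s.removeprefix('/') : drop one leading '/'
def pvRemovePrefixSlash (s : List Char) : List Char :=
  match s with
  | '/' :: rest => rest
  | _ => s

-- s.removesuffix('/') : drop one trailing '/'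
def pvRemoveSuffixSlash (s : List Char) : List Char :=
  if s.getLast? = some '/' then s.dropLast else s

-- [b for b, _ in takewhile(lambda p: p[0] == p[1], zip(btok, ctok))]
def pvMatched (bt ct : List (List Char)) : List (List Char) :=
  ((bt.zip ct).takeWhile (fun p => p.1 == p.2)).map Prod.fst

def calc_path_similarity_alt (bpath : String) (cpath : String) : Int × String :=
  let bt := PySem.Chars.splitOn (pvRemoveSuffixSlash (pvRemovePrefixSlash bpath.toList)) ['/']
  let ct := PySem.Chars.splitOn (pvRemoveSuffixSlash (pvRemovePrefixSlash cpath.toList)) ['/']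
  let m := pvMatched bt ct
  (2 ^ (m.length + 1) - 2, String.ofList ((m.map (fun t => '/' :: t)).flatten))

-- ===== PRECONDITION & SPEC =====
def Spec_calc_path_similarity (bpath : String) (cpath : String) (out : Int × String) : Prop := out = calc_path_similarity_alt bpath cpath
instance (bpath : String) (cpath : String) (out : Int × String) : Decidable (Spec_calc_path_similarity bpath cpath out) := by unfold Spec_calc_path_similarity; infer_instance

-- ===== CLAIM (what is proved, stated in full; the proofs are below) =====
def Claim_equal_calc_path_similarity : Prop := ∀ (bpath : String) (cpath : String), Dom_calc_path_similarity bpath cpath → Spec_calc_path_similarity bpath cpath (calc_path_similarity bpath cpath)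

-- ===== LEMMAS AND PROOFS =====

-- leading-slash strip of A equals removeprefix('/')
theorem pv_pre_eq (l : List Char) :
    (if PySem.Chars.startswith l ['/'] then PySem.Chars.slice l (some 1) none else l)
      = pvRemovePrefixSlash l := by
  match l with
  | [] => simp [pvRemovePrefixSlash, PySem.Chars.startswith_iff]
  | c :: t =>
    by_cases hc : c = '/'
    · subst hc
      have h : PySem.Chars.startswith ('/' :: t) ['/'] = true :=
        (PySem.Chars.startswith_iff _ _).mpr ⟨t, rfl⟩
      simp [h, pvRemovePrefixSlash, PySem.List.slice_from_one]
    · have h : PySem.Chars.startswith (c :: t) ['/'] = false := by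
        rw [Bool.eq_false_iff]
        intro hs
        rcases (PySem.Chars.startswith_iff _ _).mp hs with ⟨u, hu⟩
        simp at hu
        exact hc hu.1.symm
      simp [h, pvRemovePrefixSlash]
      match t with
      | [] => simp [hc]
      | _ :: _ => simp [hc]

-- trailing-slash strip of A equals removesuffix('/')
theorem pv_suf_eq (l : List Char) :
    (if PySem.Chars.endswith l ['/'] then PySem.Chars.slice l none (some (-1)) else l)
      = pvRemoveSuffixSlash l := by
  have hiff : PySem.Chars.endswith l ['/'] = true ↔ l.getLast? = some '/' := by
    rw [PySem.Chars.endswith_iff, List.getLast?_eq_some_iff]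
    constructor
    · rintro ⟨u, hu⟩; exact ⟨u, hu.symm⟩
    · rintro ⟨u, hu⟩; exact ⟨u, hu.symm⟩
  by_cases h : l.getLast? = some '/'
  · simp [pvRemoveSuffixSlash, h, hiff.mpr h, PySem.List.slice_to_neg_one]
  · have : PySem.Chars.endswith l ['/'] = false := by
      rw [Bool.eq_false_iff]; intro hs; exact h (hiff.mp hs)
    simp [pvRemoveSuffixSlash, h, this]

-- loop invariant: from index i <= L the A-loop adds the remaining geometric terms and tokens
theorem pvALoop_spec (bt ct : List (List Char)) :
    ∀ (i : Nat) (score : Int) (path : List Char), i ≤ (pvMatched bt ct).length →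
      pvALoop bt ct (min bt.length ct.length) i score path =
        (score + (2 ^ ((pvMatched bt ct).length + 1) - 2 ^ (i + 1)),
         path ++ (((pvMatched bt ct).drop i).map (fun t => '/' :: t)).flatten) := by
  set z := bt.zip ct with hz
  set p : List Char × List Char → Bool := fun q => q.1 == q.2 with hp
  set m := pvMatched bt ct with hm
  have hmw : m = (z.takeWhile p).map Prod.fst := rfl
  have hLn : m.length ≤ min bt.length ct.length := by
    rw [hmw, List.length_map]
    calc (z.takeWhile p).length ≤ z.length := (List.takeWhile_prefix p).length_le
    _ = min bt.length ct.length := List.length_zip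
  suffices H : ∀ (k i : Nat), min bt.length ct.length - i ≤ k → ∀ (score : Int) (path : List Char),
      i ≤ m.length →
      pvALoop bt ct (min bt.length ct.length) i score path =
        (score + (2 ^ (m.length + 1) - 2 ^ (i + 1)),
         path ++ ((m.drop i).map (fun t => '/' :: t)).flatten) by
    intro i score path h
    exact H _ i le_rfl score path h
  intro k
  induction k with
  | zero =>
    intro i hk score path hiL
    have hin : ¬ i < min bt.length ct.length := by omega
    rw [pvALoop]
    simp only [hin, dif_neg, not_false_iff]
    have hieq : i = m.length := by omega
    rw [hieq]
    simp
  | succ k ih =>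
    intro i hk score path hiL
    rw [pvALoop]
    by_cases hin : i < min bt.length ct.length
    · simp only [hin, dif_pos]
      have hib : i < bt.length := lt_of_lt_of_le hin (Nat.min_le_left _ _)
      have hic : i < ct.length := lt_of_lt_of_le hin (Nat.min_le_right _ _)
      have hiz : i < z.length := by rw [hz, List.length_zip]; exact hin
      by_cases hiLlt : i < m.length
      · -- matching step
        have hit : i < (z.takeWhile p).length := by
          rw [hmw, List.length_map] at hiLlt; exact hiLlt
        have hget : (z.takeWhile p)[i] = z[i] := (List.takeWhile_prefix p).getElem hit
        have hpred : p ((z.takeWhile p)[i]) = true :=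
          List.mem_takeWhile_imp (List.getElem_mem hit)
        rw [hget] at hpred
        have hzi : z[i] = (bt[i], ct[i]) := List.getElem_zip
        have heq : bt[i] = ct[i] := by
          rw [hzi] at hpred; simpa [hp] using hpred
        have hmi : m[i]'hiLlt = bt[i] := by
          rw [List.getElem_of_eq hmw, List.getElem_map, hget, hzi]
        have hgb : bt.getD i [] = bt[i] := List.getD_eq_getElem bt [] hib
        have hgc : ct.getD i [] = ct[i] := List.getD_eq_getElem ct [] hic
        rw [hgb, hgc, if_neg (by simp [heq])]
        rw [ih (i + 1) (by omega) _ _ hiLlt]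
        rw [Prod.mk.injEq]
        refine ⟨?_, ?_⟩
        · have h2 : (2 : Int) ^ (i + 1 + 1) = 2 ^ (i + 1) * 2 := by ring
          rw [h2]; ring
        · have hdrop : m.drop i = m[i]'hiLlt :: m.drop (i + 1) :=
            List.drop_eq_getElem_cons hiLlt
          rw [hdrop, hmi]
          simp
      · -- break step: i = m.length < min, tokens differ
        have hiL' : i = m.length := le_antisymm hiL (le_of_not_gt hiLlt)
        have htw : (z.takeWhile p).length = i := by
          rw [hmw, List.length_map] at hiL'; omega
        have hd : z.dropWhile p ≠ [] := by
          intro hnil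
          have hts := List.takeWhile_append_dropWhile (p := p) (l := z)
          rw [hnil, List.append_nil] at hts
          have : z.length = i := by rw [← hts, htw]
          omega
        have hph : p ((z.dropWhile p).head hd) = false := List.head_dropWhile_not p hd
        have hsplit : z = z.takeWhile p ++ z.dropWhile p :=
          (List.takeWhile_append_dropWhile).symm
        have hzi' : p z[i] = false := by
          rw [List.getElem_of_eq hsplit hiz,
              List.getElem_append_right (by omega)]
          have h0 : i - (z.takeWhile p).length = 0 := by omega
          simp only [h0, List.getElem_zero_eq_head]
          exact hph
        rw [List.getElem_zip] at hzi'
        have hne : bt.getD i [] ≠ ct.getD i [] := by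
          rw [List.getD_eq_getElem bt [] hib, List.getD_eq_getElem ct [] hic]
          simpa [hp] using hzi'
        rw [if_pos hne]
        have hdrop : m.drop i = [] := by rw [hiL']; simp
        rw [hdrop]
        simp [hiL']
    · simp only [hin, dif_neg, not_false_iff]
      have hieq : i = m.length := by omega
      rw [hieq]
      simp

-- ===== VERDICT (by name: the statement is the Claim_ definition above) =====
theorem calc_path_similarity_spec : Claim_equal_calc_path_similarity := by
  intro bpath cpath _
  unfold Spec_calc_path_similarity calc_path_similarity calc_path_similarity_alt
  simp only [pv_pre_eq, pv_suf_eq]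
  set bt := PySem.Chars.splitOn (pvRemoveSuffixSlash (pvRemovePrefixSlash bpath.toList)) ['/']
  set ct := PySem.Chars.splitOn (pvRemoveSuffixSlash (pvRemovePrefixSlash cpath.toList)) ['/']
  rw [pvALoop_spec bt ct 0 0 [] (Nat.zero_le _)]
  simp
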